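-- pv_equiv track=rewrite | github.com/SelenImahanoglu/data-sudoku | sudoku.py | sudoku_validator
-- ===== SOURCE A (Python) =====
-- def is_valid_unit(unit):
--     """Satır, sütun veya 3x3 karedeki sayıları 1-9 arası kontrol eder."""
--     # 1'den 9'a kadar olan sayıların her biri tam olarak bir kez bulunmalıdır
--     return sorted(unit) == list(range(1, 10))
--
-- def sudoku_validator(grid):
--     """
--     9x9 Sudoku grid'inin satır, sütun ve kare kurallarına göre doğruluğunu kontrol eder.
--     """
--     # 1. Satırların Kontrolü
--     # Grid zaten satır listelerinden oluştuğu için doğrudan döngüye alıyoruz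
--     for row in grid:
--         if not is_valid_unit(row):
--             return False
--
--     # 2. Sütunların Kontrolü
--     # Her bir sütun indeksine (0-8) göre dikeydeki sayıları bir listeye topluyoruz
--     for col_idx in range(9):
--         column = [grid[row_idx][col_idx] for row_idx in range(9)]
--         if not is_valid_unit(column):
--             return False
--
--     # 3. 3x3 Alt Karelerin Kontrolü
--     # Grid'i 3'erli bloklar halinde geziyoruz
--     for r in range(0, 9, 3):
--         for c in range(0, 9, 3):
--             square = []
--             for i in range(3):
--                 for j in range(3):
--                     square.append(grid[r + i][c + j])
--             if not is_valid_unit(square):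
--                 return False
--
--     # Tüm kontrollerden geçtiyse Sudoku geçerlidir
--     return True
-- ===== SOURCE B (Python) =====
-- def sudoku_validator(grid):
--     # A valid 9x9 Sudoku: exactly 9 rows of 9 entries; one pass over all 81 cells,
--     # maintaining running sets per row, per column and per 3x3 box, failing fast.
--     if len(grid) != 9 or any(len(row) != 9 for row in grid):
--         return False
--     rows = [set() for _ in range(9)]
--     cols = [set() for _ in range(9)]
--     boxes = [set() for _ in range(9)]
--     for i in range(9):
--         for j in range(9):
--             v = grid[i][j]
--             b = (i // 3) * 3 + j // 3
--             if v < 1 or v > 9 or v in rows[i] or v in cols[j] or v in boxes[b]: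
--                 return False
--             rows[i].add(v)
--             cols[j].add(v)
--             boxes[b].add(v)
--     return True
-- ===== Notes on version B (the rewrite author's own statement) =====
-- stated objective: alternative
-- what changed: Replaces A's three staged gather-and-sort phases (rows, then columns, then 3x3 squares, each collected into a list, sorted and compared to range(1,10)) with a shape check plus one fail-fast pass over the 81 cells that maintains running row/column/box sets and rejects an out-of-range value or duplicate immediately.
import Mathlib
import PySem

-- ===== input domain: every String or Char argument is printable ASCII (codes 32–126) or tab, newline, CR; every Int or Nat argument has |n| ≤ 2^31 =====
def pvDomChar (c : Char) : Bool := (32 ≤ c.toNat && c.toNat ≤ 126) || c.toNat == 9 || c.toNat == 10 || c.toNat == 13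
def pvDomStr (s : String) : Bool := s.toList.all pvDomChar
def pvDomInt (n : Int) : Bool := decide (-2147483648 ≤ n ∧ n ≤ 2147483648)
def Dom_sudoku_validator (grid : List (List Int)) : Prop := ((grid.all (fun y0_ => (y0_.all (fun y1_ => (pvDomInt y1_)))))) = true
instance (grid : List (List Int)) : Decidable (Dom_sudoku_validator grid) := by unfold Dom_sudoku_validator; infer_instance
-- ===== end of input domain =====

-- B replaces A's three staged gather-and-sort phases by a shape check plus one fail-fast
-- pass over the 81 cells maintaining running row/column/box sets.

-- grid[i][j] (total form; wherever the ports reach it under Pre_, the indices are in range)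
def pvCell (grid : List (List Int)) (i j : Int) : Int :=
  PySem.List.pyGetD (PySem.List.pyGetD grid i []) j 0

-- ===== PORT A =====
-- sorted(unit) == list(range(1, 10))
def is_valid_unit (unit : List Int) : Bool :=
  PySem.List.sorted unit (fun x => x) false == PySem.List.pyRange 1 10 1

def sudoku_validator (grid : List (List Int)) : Bool :=
  -- rows loop, then columns loop, then 3x3-squares loop; each early-returns False
  (grid.all (fun row => is_valid_unit row)) &&
  ((PySem.List.pyRange 0 9 1).all (fun col_idx =>
      is_valid_unit ((PySem.List.pyRange 0 9 1).map (fun row_idx => pvCell grid row_idx col_idx)))) &&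
  ((PySem.List.pyRange 0 9 3).all (fun r =>
    (PySem.List.pyRange 0 9 3).all (fun c =>
      is_valid_unit ((PySem.List.pyRange 0 3 1).flatMap (fun i =>
        (PySem.List.pyRange 0 3 1).map (fun j => pvCell grid (r + i) (c + j)))))))

-- ===== PORT B =====
-- [set() for _ in range(9)]
def pvEmptySets : List (PySem.Set Int) := List.replicate 9 PySem.Set.empty

-- the flattened double loop 'for i in range(9): for j in range(9)'
def pvAllCells : List (Int × Int) :=
  (PySem.List.pyRange 0 9 1).flatMap (fun i => (PySem.List.pyRange 0 9 1).map (fun j => (i, j)))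

-- the loop body: early return False, else add v to rows[i], cols[j], boxes[b] and continue
def pvPassB (grid : List (List Int)) :
    List (Int × Int) → List (PySem.Set Int) → List (PySem.Set Int) → List (PySem.Set Int) → Bool
  | [], _, _, _ => true
  | (i, j) :: rest, rs, cs, bs =>
    let v := pvCell grid i j
    let b := PySem.Int.floordiv i 3 * 3 + PySem.Int.floordiv j 3
    if v < 1 || 9 < v ||
       PySem.Set.contains (PySem.List.pyGetD rs i PySem.Set.empty) v ||
       PySem.Set.contains (PySem.List.pyGetD cs j PySem.Set.empty) v ||
       PySem.Set.contains (PySem.List.pyGetD bs b PySem.Set.empty) v then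
      false
    else
      pvPassB grid rest
        (PySem.List.pySetD rs i (PySem.Set.add (PySem.List.pyGetD rs i PySem.Set.empty) v))
        (PySem.List.pySetD cs j (PySem.Set.add (PySem.List.pyGetD cs j PySem.Set.empty) v))
        (PySem.List.pySetD bs b (PySem.Set.add (PySem.List.pyGetD bs b PySem.Set.empty) v))

def sudoku_validator_alt (grid : List (List Int)) : Bool :=
  if PySem.List.len grid != 9 || grid.any (fun row => PySem.List.len row != 9) then false
  else pvPassB grid pvAllCells pvEmptySets pvEmptySets pvEmptySets

-- ===== PRECONDITION & SPEC =====
-- Pre_ excludes exactly the grids that are not 9 rows yet have every row a permutation of 1..9: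
-- with fewer rows A raises IndexError in its column phase, and with more rows A accidentally
-- validates only the first nine rows' columns/boxes (a defensible-corner artefact: a 10-row grid
-- is not a 9x9 Sudoku, and B's False there is as defensible as A's value).
def Pre_sudoku_validator (grid : List (List Int)) : Prop :=
  grid.length = 9 ∨ ∃ row ∈ grid, ¬ row.Perm [1, 2, 3, 4, 5, 6, 7, 8, 9]
instance (grid : List (List Int)) : Decidable (Pre_sudoku_validator grid) := by
  unfold Pre_sudoku_validator; infer_instance

def pvWitness_sudoku_validator : List (List Int) :=
  [[5,3,4,6,7,8,9,1,2],[6,7,2,1,9,5,3,4,8],[1,9,8,3,4,2,5,6,7],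
   [8,5,9,7,6,1,4,2,3],[4,2,6,8,5,3,7,9,1],[7,1,3,9,2,4,8,5,6],
   [9,6,1,5,3,7,2,8,4],[2,8,7,4,1,9,6,3,5],[3,4,5,2,8,6,1,7,9]]

def Spec_sudoku_validator (grid : List (List Int)) (out : Bool) : Prop := out = sudoku_validator_alt grid
instance (grid : List (List Int)) (out : Bool) : Decidable (Spec_sudoku_validator grid out) := by unfold Spec_sudoku_validator; infer_instance

-- ===== CLAIM (what is proved, stated in full; the proofs are below) =====
def Claim_equal_sudoku_validator : Prop := ∀ (grid : List (List Int)), Dom_sudoku_validator grid → Pre_sudoku_validator grid → Spec_sudoku_validator grid (sudoku_validator grid)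

-- ===== LEMMAS AND PROOFS =====

-- the cell value as a function of Nat coordinates
def pvW (grid : List (List Int)) (i j : Nat) : Int := pvCell grid (i : Int) (j : Int)

-- the box index of a cell, as the port computes it
def pvBoxI (p : Int × Int) : Int := PySem.Int.floordiv p.1 3 * 3 + PySem.Int.floordiv p.2 3

-- "these two cells do not conflict": distinct values when in the same row / column / box
def pvClash (grid : List (List Int)) (p q : Int × Int) : Prop :=
  (p.1 = q.1 → pvCell grid p.1 p.2 ≠ pvCell grid q.1 q.2) ∧
  (p.2 = q.2 → pvCell grid p.1 p.2 ≠ pvCell grid q.1 q.2) ∧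
  (pvBoxI p = pvBoxI q → pvCell grid p.1 p.2 ≠ pvCell grid q.1 q.2)

-- the per-cell check of B's loop body, as a Prop over the current sets
def pvOK (grid : List (List Int)) (rs cs bs : List (PySem.Set Int)) (p : Int × Int) : Prop :=
  1 ≤ pvCell grid p.1 p.2 ∧ pvCell grid p.1 p.2 ≤ 9 ∧
  ¬ PySem.Set.contains (PySem.List.pyGetD rs p.1 PySem.Set.empty) (pvCell grid p.1 p.2) = true ∧
  ¬ PySem.Set.contains (PySem.List.pyGetD cs p.2 PySem.Set.empty) (pvCell grid p.1 p.2) = true ∧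
  ¬ PySem.Set.contains (PySem.List.pyGetD bs (pvBoxI p) PySem.Set.empty) (pvCell grid p.1 p.2) = true

-- the 27-unit duplicate-freeness conditions, stated cellwise
def pvRowsOK (grid : List (List Int)) : Prop :=
  ∀ i t t' : Nat, i < 9 → t < t' → t' < 9 → pvW grid i t ≠ pvW grid i t'
def pvColsOK (grid : List (List Int)) : Prop :=
  ∀ k t t' : Nat, k < 9 → t < t' → t' < 9 → pvW grid t k ≠ pvW grid t' k
def pvBoxesOK (grid : List (List Int)) : Prop :=
  ∀ b t t' : Nat, b < 9 → t < t' → t' < 9 →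
    pvW grid (3*(b/3)+t/3) (3*(b%3)+t%3) ≠ pvW grid (3*(b/3)+t'/3) (3*(b%3)+t'%3)
def pvNoClash (grid : List (List Int)) : Prop :=
  ∀ m m' : Nat, m < m' → m' < 81 →
    pvClash grid ((m/9 : Nat), (m%9 : Nat)) ((m'/9 : Nat), (m'%9 : Nat))

theorem pv_getD_setD (xs : List (PySem.Set Int)) (i i' v v' : Int)
    (h : xs.length = 9) (hi0 : 0 ≤ i) (hi9 : i < 9) (hi0' : 0 ≤ i') (hi9' : i' < 9) :
    PySem.Set.contains
      (PySem.List.pyGetD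
        (PySem.List.pySetD xs i (PySem.Set.add (PySem.List.pyGetD xs i PySem.Set.empty) v)) i'
        PySem.Set.empty) v' = true
    ↔ (PySem.Set.contains (PySem.List.pyGetD xs i' PySem.Set.empty) v' = true ∨ (i = i' ∧ v' = v)) := by
  rw [PySem.List.pyGetD_eq_getElem xs _ hi0 (by simp [h]; omega),
      PySem.List.pySetD_of_nonneg _ _ hi0,
      PySem.List.pyGetD_eq_getElem _ _ hi0' (by simp [h]; omega),
      PySem.List.pyGetD_eq_getElem _ _ hi0' (by simp [h]; omega)]
  rw [List.getElem_set]
  by_cases he : i.toNat = i'.toNat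
  · have hii : i = i' := by omega
    subst hii
    simp [PySem.Set.contains, PySem.Set.mem_add]
  · have hne : ¬ i = i' := by omega
    simp [he, hne, PySem.Set.contains]

theorem pv_boxI_bounds (i j : Int) (hi0 : 0 ≤ i) (hi9 : i < 9) (hj0 : 0 ≤ j) (hj9 : j < 9) :
    0 ≤ pvBoxI (i, j) ∧ pvBoxI (i, j) < 9 := by
  unfold pvBoxI
  rw [PySem.Int.floordiv_eq_ediv_of_pos (by norm_num), PySem.Int.floordiv_eq_ediv_of_pos (by norm_num)]
  constructor <;> simp <;> omega

theorem pv_pass_iff (grid : List (List Int)) :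
    ∀ (cells : List (Int × Int)) (rs cs bs : List (PySem.Set Int)),
      rs.length = 9 → cs.length = 9 → bs.length = 9 →
      (∀ p ∈ cells, 0 ≤ p.1 ∧ p.1 < 9 ∧ 0 ≤ p.2 ∧ p.2 < 9) →
      (pvPassB grid cells rs cs bs = true ↔
        ((∀ p ∈ cells, pvOK grid rs cs bs p) ∧ List.Pairwise (pvClash grid) cells)) := by
  intro cells
  induction cells with
  | nil => intro rs cs bs _ _ _ _; simp [pvPassB]
  | cons p rest ih =>
    obtain ⟨i, j⟩ := p
    intro rs cs bs hrl hcl hbl hbnd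
    obtain ⟨hi0, hi9, hj0, hj9⟩ := hbnd (i, j) (by simp)
    have hbndr : ∀ q ∈ rest, 0 ≤ q.1 ∧ q.1 < 9 ∧ 0 ≤ q.2 ∧ q.2 < 9 :=
      fun q hq => hbnd q (List.mem_cons_of_mem _ hq)
    obtain ⟨hb0, hb9⟩ := pv_boxI_bounds i j hi0 hi9 hj0 hj9
    simp only [pvPassB]
    split
    next hC =>
      simp only [Bool.or_eq_true, decide_eq_true_eq] at hC
      constructor
      · intro h; exact absurd h (by simp)
      · rintro ⟨hall, -⟩
        obtain ⟨h1, h2, h3, h4, h5⟩ := hall (i, j) (by simp)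
        dsimp only at h1 h2 h3 h4 h5
        rcases hC with ((((h | h) | h) | h) | h)
        · omega
        · omega
        · exact absurd h h3
        · exact absurd h h4
        · exact absurd h h5
    next hC =>
      simp only [Bool.or_eq_true, decide_eq_true_eq, not_or] at hC
      obtain ⟨⟨⟨⟨ha, hb⟩, hc3⟩, hc4⟩, hc5⟩ := hC
      have hok : pvOK grid rs cs bs (i, j) :=
        ⟨by show 1 ≤ pvCell grid i j; omega, by show pvCell grid i j ≤ 9; omega, hc3, hc4, hc5⟩
      rw [ih _ _ _ (by simp [hrl]) (by simp [hcl]) (by simp [hbl]) hbndr]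
      have heq : ∀ q ∈ rest,
          (pvOK grid
            (PySem.List.pySetD rs i (PySem.Set.add (PySem.List.pyGetD rs i PySem.Set.empty) (pvCell grid i j)))
            (PySem.List.pySetD cs j (PySem.Set.add (PySem.List.pyGetD cs j PySem.Set.empty) (pvCell grid i j)))
            (PySem.List.pySetD bs (PySem.Int.floordiv i 3 * 3 + PySem.Int.floordiv j 3)
              (PySem.Set.add (PySem.List.pyGetD bs (PySem.Int.floordiv i 3 * 3 + PySem.Int.floordiv j 3) PySem.Set.empty) (pvCell grid i j))) q
            ↔ pvOK grid rs cs bs q ∧ pvClash grid (i, j) q) := by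
        rintro ⟨i', j'⟩ hq
        obtain ⟨hi0', hi9', hj0', hj9'⟩ := hbndr _ hq
        obtain ⟨hb0', hb9'⟩ := pv_boxI_bounds i' j' hi0' hi9' hj0' hj9'
        unfold pvOK pvClash
        dsimp only
        rw [show PySem.Int.floordiv i 3 * 3 + PySem.Int.floordiv j 3 = pvBoxI (i, j) from rfl]
        rw [pv_getD_setD rs i i' (pvCell grid i j) _ hrl hi0 hi9 hi0' hi9',
            pv_getD_setD cs j j' (pvCell grid i j) _ hcl hj0 hj9 hj0' hj9',
            pv_getD_setD bs (pvBoxI (i, j)) (pvBoxI (i', j')) (pvCell grid i j) _ hbl hb0 hb9 hb0' hb9']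
        constructor
        · rintro ⟨g1, g2, g3, g4, g5⟩
          exact ⟨⟨g1, g2, fun h => g3 (Or.inl h), fun h => g4 (Or.inl h), fun h => g5 (Or.inl h)⟩,
                 fun h hv => g3 (Or.inr ⟨h, hv.symm⟩), fun h hv => g4 (Or.inr ⟨h, hv.symm⟩),
                 fun h hv => g5 (Or.inr ⟨h, hv.symm⟩)⟩
        · rintro ⟨⟨g1, g2, g3, g4, g5⟩, k1, k2, k3⟩
          refine ⟨g1, g2, ?_, ?_, ?_⟩
          · rintro (h | ⟨h, hv⟩); exacts [g3 h, k1 h hv.symm]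
          · rintro (h | ⟨h, hv⟩); exacts [g4 h, k2 h hv.symm]
          · rintro (h | ⟨h, hv⟩); exacts [g5 h, k3 h hv.symm]
      simp only [List.forall_mem_cons, List.pairwise_cons]
      constructor
      · rintro ⟨hA, hP⟩
        exact ⟨⟨hok, fun q hq => ((heq q hq).mp (hA q hq)).1⟩,
               fun q hq => ((heq q hq).mp (hA q hq)).2, hP⟩
      · rintro ⟨⟨-, hA⟩, hCl, hP⟩
        exact ⟨fun q hq => (heq q hq).mpr ⟨hA q hq, hCl q hq⟩, hP⟩

-- A's unit test: sorted(u) == [1..9]  ↔  u is a permutation of [1..9]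
theorem pv_isValidUnit_iff (u : List Int) :
    is_valid_unit u = true ↔ u.Perm [1,2,3,4,5,6,7,8,9] := by
  unfold is_valid_unit
  have h9 : PySem.List.pyRange 1 10 1 = [1,2,3,4,5,6,7,8,9] := by decide
  rw [h9, beq_iff_eq]
  constructor
  · intro h
    have hp := PySem.List.sorted_perm u (fun x => x) false
    rw [h] at hp
    exact hp.symm
  · intro h
    exact PySem.List.sorted_eq_of_perm_of_pairwise_lt u _ _ h.symm (by decide)

theorem pv_mem_nine_iff (x : Int) : x ∈ ([1,2,3,4,5,6,7,8,9] : List Int) ↔ 1 ≤ x ∧ x ≤ 9 := by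
  simp; omega

-- a 9-element list of values from 1..9 is a permutation of [1..9] iff it has no duplicates
theorem pv_unit_perm_iff (u : List Int) (hlen : u.length = 9)
    (hsub : ∀ x ∈ u, x ∈ ([1,2,3,4,5,6,7,8,9] : List Int)) :
    u.Perm [1,2,3,4,5,6,7,8,9] ↔ u.Nodup := by
  constructor
  · intro h; exact h.nodup_iff.mpr (by decide)
  · intro hnd
    exact (hnd.subperm hsub).perm_of_length_le (by rw [hlen]; rfl)

theorem pv_nodup_map_pyRange (f : Int → Int) :
    ((PySem.List.pyRange 0 9 1).map f).Nodup ↔ ∀ t t' : Nat, t < t' → t' < 9 → f t ≠ f t' := by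
  rw [List.Nodup, List.pairwise_map, List.pairwise_iff_getElem]
  simp only [PySem.List.length_pyRange_one, PySem.List.getElem_pyRange_one]
  norm_num
  constructor
  · intro h t t' htt ht9
    exact h t t' (by omega) (by omega) htt
  · intro h t t' ht ht' htt
    exact h t t' htt (by omega)

theorem pv_nodup_map_range (f : Nat → Int) :
    ((List.range 9).map f).Nodup ↔ ∀ t t' : Nat, t < t' → t' < 9 → f t ≠ f t' := by
  rw [List.Nodup, List.pairwise_map, List.pairwise_iff_getElem]
  simp only [List.length_range, List.getElem_range]
  constructor
  · intro h t t' htt ht9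
    exact h t t' (by omega) (by omega) htt
  · intro h t t' ht ht' htt
    exact h t t' htt (by omega)

-- any cell addressed with in-range indices of a grid of valid rows lies in 1..9
theorem pv_cell_mem (grid : List (List Int)) (h9 : 9 ≤ grid.length)
    (hrows : ∀ row ∈ grid, row.Perm [1,2,3,4,5,6,7,8,9]) (i j : Int)
    (hi0 : 0 ≤ i) (hi9 : i < 9) (hj0 : 0 ≤ j) (hj9 : j < 9) :
    pvCell grid i j ∈ ([1,2,3,4,5,6,7,8,9] : List Int) := by
  have hit : i.toNat < grid.length := by omega
  rw [pvCell, PySem.List.pyGetD_of_nonneg _ _ hi0, List.getD_eq_getElem _ _ hit]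
  have hrow := hrows _ (List.getElem_mem hit)
  have hlen : (grid[i.toNat]).length = 9 := by rw [hrow.length_eq]; rfl
  have hjt : j.toNat < (grid[i.toNat]).length := by omega
  rw [PySem.List.pyGetD_of_nonneg _ _ hj0, List.getD_eq_getElem _ _ hjt]
  exact hrow.subset (List.getElem_mem hjt)

-- grid[i] written through pvW, under the shape hypotheses
theorem pv_row_eq (grid : List (List Int)) (i : Nat) (hi : i < grid.length)
    (h9 : (grid[i]).length = 9) :
    grid[i] = (List.range 9).map (fun j => pvW grid i j) := by
  apply List.ext_getElem
  · simp [h9]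
  · intro j hj hj'
    simp only [List.getElem_map, List.getElem_range]
    unfold pvW pvCell
    simp only [PySem.List.pyGetD_natCast]
    rw [List.getD_eq_getElem _ _ hi, List.getD_eq_getElem _ _ (by omega)]

theorem pv_boxI_cast (a c : Nat) : pvBoxI ((a : Int), (c : Int)) = ((a/3*3 + c/3 : Nat) : Int) := by
  unfold pvBoxI
  rw [PySem.Int.floordiv_eq_ediv_of_pos (by norm_num), PySem.Int.floordiv_eq_ediv_of_pos (by norm_num)]
  dsimp only
  omega

theorem pv_cells_bounds : ∀ p ∈ pvAllCells, 0 ≤ p.1 ∧ p.1 < 9 ∧ 0 ≤ p.2 ∧ p.2 < 9 := by decide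

theorem pv_cells_get : ∀ m, m < 81 →
    pvAllCells[m]? = some (((m / 9 : Nat) : Int), ((m % 9 : Nat) : Int)) := by decide

theorem pv_forall_cells (P : Int × Int → Prop) :
    (∀ p ∈ pvAllCells, P p) ↔ ∀ i j : Nat, i < 9 → j < 9 → P ((i : Int), (j : Int)) := by
  constructor
  · intro h i j hi hj
    refine h _ ?_
    simp only [pvAllCells, List.mem_flatMap, List.mem_map, PySem.List.mem_pyRange_one]
    exact ⟨(i : Int), ⟨by positivity, by exact_mod_cast hi⟩, (j : Int), ⟨by positivity, by exact_mod_cast hj⟩, rfl⟩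
  · intro h p hp
    simp only [pvAllCells, List.mem_flatMap, List.mem_map, PySem.List.mem_pyRange_one] at hp
    obtain ⟨i, ⟨hi0, hi9⟩, j, ⟨hj0, hj9⟩, rfl⟩ := hp
    have := h i.toNat j.toNat (by omega) (by omega)
    rwa [Int.toNat_of_nonneg hi0, Int.toNat_of_nonneg hj0] at this

theorem pv_pairwise_cells (grid : List (List Int)) :
    List.Pairwise (pvClash grid) pvAllCells ↔ pvNoClash grid := by
  have hlen : pvAllCells.length = 81 := by decide
  have hget : ∀ (m : Nat) (h : m < 81),
      pvAllCells[m]'(by omega) = (((m / 9 : Nat) : Int), ((m % 9 : Nat) : Int)) := by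
    intro m h
    have h2 := pv_cells_get m h
    rwa [List.getElem?_eq_getElem (by omega), Option.some_inj] at h2
  rw [List.pairwise_iff_getElem]
  unfold pvNoClash
  constructor
  · intro h m m' hmm hm'
    have := h m m' (by omega) (by omega) hmm
    rwa [hget m (by omega), hget m' (by omega)] at this
  · intro h m m' hm hm' hmm
    rw [hget m (by omega), hget m' (by omega)]
    exact h m m' hmm (by omega)

theorem pv_ok_empty (grid : List (List Int)) (p : Int × Int)
    (hb : 0 ≤ p.1 ∧ p.1 < 9 ∧ 0 ≤ p.2 ∧ p.2 < 9) :
    pvOK grid pvEmptySets pvEmptySets pvEmptySets p ↔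
      (1 ≤ pvCell grid p.1 p.2 ∧ pvCell grid p.1 p.2 ≤ 9) := by
  obtain ⟨h1, h2, h3, h4⟩ := hb
  obtain ⟨hb0, hb9⟩ := pv_boxI_bounds p.1 p.2 h1 h2 h3 h4
  have hg : ∀ (idx : Int), 0 ≤ idx → idx < 9 →
      PySem.List.pyGetD pvEmptySets idx PySem.Set.empty = PySem.Set.empty := by
    intro idx k0 k9
    rw [PySem.List.pyGetD_eq_getElem _ _ k0 (by simp [pvEmptySets]; omega)]
    simp only [pvEmptySets, List.getElem_replicate]
  unfold pvOK
  rw [hg p.1 h1 h2, hg p.2 h3 h4, hg (pvBoxI p) (by simpa using hb0) (by simpa using hb9)]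
  simp [PySem.Set.contains, PySem.Set.empty]

theorem pv_NC_iff (grid : List (List Int)) :
    pvNoClash grid ↔ pvRowsOK grid ∧ pvColsOK grid ∧ pvBoxesOK grid := by
  constructor
  · intro hnc
    refine ⟨?_, ?_, ?_⟩
    · intro i t t' hi htt ht9
      have h := hnc (9*i+t) (9*i+t') (by omega) (by omega)
      rw [show (9*i+t)/9 = i from by omega, show (9*i+t)%9 = t from by omega,
          show (9*i+t')/9 = i from by omega, show (9*i+t')%9 = t' from by omega] at h
      exact h.1 rfl
    · intro k t t' hk htt ht9
      have h := hnc (9*t+k) (9*t'+k) (by omega) (by omega)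
      rw [show (9*t+k)/9 = t from by omega, show (9*t+k)%9 = k from by omega,
          show (9*t'+k)/9 = t' from by omega, show (9*t'+k)%9 = k from by omega] at h
      exact h.2.1 rfl
    · intro b t t' hb htt ht9
      have h := hnc (9*(3*(b/3)+t/3) + (3*(b%3)+t%3)) (9*(3*(b/3)+t'/3) + (3*(b%3)+t'%3))
        (by omega) (by omega)
      rw [show (9*(3*(b/3)+t/3) + (3*(b%3)+t%3))/9 = 3*(b/3)+t/3 from by omega,
          show (9*(3*(b/3)+t/3) + (3*(b%3)+t%3))%9 = 3*(b%3)+t%3 from by omega,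
          show (9*(3*(b/3)+t'/3) + (3*(b%3)+t'%3))/9 = 3*(b/3)+t'/3 from by omega,
          show (9*(3*(b/3)+t'/3) + (3*(b%3)+t'%3))%9 = 3*(b%3)+t'%3 from by omega] at h
      apply h.2.2
      rw [pv_boxI_cast, pv_boxI_cast]
      exact congrArg _ (by omega)
  · rintro ⟨hr, hc, hbx⟩ m m' hmm hm81
    refine ⟨?_, ?_, ?_⟩
    · intro he
      dsimp only at he ⊢
      have hii : m/9 = m'/9 := by exact_mod_cast he
      rw [show ((m'/9 : Nat) : Int) = ((m/9 : Nat) : Int) from by rw [hii]]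
      exact hr (m/9) (m%9) (m'%9) (by omega) (by omega) (by omega)
    · intro he
      dsimp only at he ⊢
      have hjj : m%9 = m'%9 := by exact_mod_cast he
      rw [show ((m'%9 : Nat) : Int) = ((m%9 : Nat) : Int) from by rw [hjj]]
      exact hc (m%9) (m/9) (m'/9) (by omega) (by omega) (by omega)
    · intro he
      dsimp only at he ⊢
      rw [pv_boxI_cast, pv_boxI_cast] at he
      have hbe : (m/9)/3*3 + (m%9)/3 = (m'/9)/3*3 + (m'%9)/3 := by exact_mod_cast he
      have h := hbx ((m/9)/3*3 + (m%9)/3) ((m/9)%3*3 + (m%9)%3) ((m'/9)%3*3 + (m'%9)%3)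
        (by omega) (by omega) (by omega)
      rw [show 3*(((m/9)/3*3 + (m%9)/3)/3) + ((m/9)%3*3 + (m%9)%3)/3 = m/9 from by omega,
          show 3*(((m/9)/3*3 + (m%9)/3)%3) + ((m/9)%3*3 + (m%9)%3)%3 = m%9 from by omega,
          show 3*(((m/9)/3*3 + (m%9)/3)/3) + ((m'/9)%3*3 + (m'%9)%3)/3 = m'/9 from by omega,
          show 3*(((m/9)/3*3 + (m%9)/3)%3) + ((m'/9)%3*3 + (m'%9)%3)%3 = m'%9 from by omega] at h
      exact h

-- B's pass over the whole board, characterised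
theorem pv_pass_main (grid : List (List Int)) :
    pvPassB grid pvAllCells pvEmptySets pvEmptySets pvEmptySets = true ↔
      ((∀ i j : Nat, i < 9 → j < 9 → 1 ≤ pvW grid i j ∧ pvW grid i j ≤ 9) ∧ pvNoClash grid) := by
  rw [pv_pass_iff grid pvAllCells _ _ _ (by simp [pvEmptySets]) (by simp [pvEmptySets])
      (by simp [pvEmptySets]) pv_cells_bounds]
  constructor
  · rintro ⟨hall, hpw⟩
    refine ⟨?_, (pv_pairwise_cells grid).mp hpw⟩
    intro i j hi hj
    have hm := (pv_forall_cells _).mp hall i j hi hj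
    exact (pv_ok_empty grid _ (by dsimp only; omega)).mp hm
  · rintro ⟨hrange, hnc⟩
    refine ⟨?_, (pv_pairwise_cells grid).mpr hnc⟩
    intro p hp
    obtain hb := pv_cells_bounds p hp
    rw [pv_ok_empty grid p hb]
    obtain ⟨h1, h2, h3, h4⟩ := hb
    have := hrange p.1.toNat p.2.toNat (by omega) (by omega)
    unfold pvW at this
    rwa [Int.toNat_of_nonneg h1, Int.toNat_of_nonneg h3] at this

-- the generic unit characterisation for A's sorted test on a 9-cell comprehension
theorem pv_unit_iff (f : Int → Int)
    (hmem : ∀ t : Int, 0 ≤ t → t < 9 → f t ∈ ([1,2,3,4,5,6,7,8,9] : List Int)) :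
    is_valid_unit ((PySem.List.pyRange 0 9 1).map f) = true ↔
      ∀ t t' : Nat, t < t' → t' < 9 → f t ≠ f t' := by
  rw [pv_isValidUnit_iff]
  have hlen : ((PySem.List.pyRange 0 9 1).map f).length = 9 := by
    simp [PySem.List.length_pyRange_one]
  have hsub : ∀ x ∈ (PySem.List.pyRange 0 9 1).map f, x ∈ ([1,2,3,4,5,6,7,8,9] : List Int) := by
    intro x hx
    simp only [List.mem_map, PySem.List.mem_pyRange_one] at hx
    obtain ⟨t, ⟨ht0, ht9⟩, rfl⟩ := hx
    exact hmem t ht0 ht9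
  rw [pv_unit_perm_iff _ hlen hsub, pv_nodup_map_pyRange]

theorem pv_colsAll_iff (grid : List (List Int)) (hlen : grid.length = 9)
    (hrows : ∀ row ∈ grid, row.Perm [1,2,3,4,5,6,7,8,9]) :
    ((PySem.List.pyRange 0 9 1).all (fun col_idx =>
        is_valid_unit ((PySem.List.pyRange 0 9 1).map (fun row_idx => pvCell grid row_idx col_idx))) = true)
    ↔ pvColsOK grid := by
  simp only [List.all_eq_true]
  have hmem : ∀ k : Int, 0 ≤ k → k < 9 → ∀ s : Int, 0 ≤ s → s < 9 →
      pvCell grid s k ∈ ([1,2,3,4,5,6,7,8,9] : List Int) :=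
    fun k hk0 hk9 s hs0 hs9 => pv_cell_mem grid (by omega) hrows s k hs0 hs9 hk0 hk9
  constructor
  · intro h k t t' hk htt ht9
    have hu := h (k : Int) (by rw [PySem.List.mem_pyRange_one]; omega)
    exact (pv_unit_iff _ (hmem k (by omega) (by exact_mod_cast hk))).mp hu t t' htt ht9
  · intro h k hkm
    rw [PySem.List.mem_pyRange_one] at hkm
    obtain ⟨kn, rfl⟩ : ∃ n : Nat, k = (n : Int) := ⟨k.toNat, by omega⟩
    rw [pv_unit_iff _ (hmem kn (by omega) (by omega))]
    intro t t' htt ht9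
    exact h kn t t' (by exact_mod_cast hkm.2) htt ht9

theorem pv_box_unit_iff (grid : List (List Int)) (hlen : grid.length = 9)
    (hrows : ∀ row ∈ grid, row.Perm [1,2,3,4,5,6,7,8,9]) (b : Nat) (hb : b < 9) :
    (is_valid_unit ((PySem.List.pyRange 0 3 1).flatMap (fun i =>
        (PySem.List.pyRange 0 3 1).map (fun j =>
          pvCell grid (((3*(b/3) : Nat) : Int) + i) (((3*(b%3) : Nat) : Int) + j)))) = true)
    ↔ ∀ t t' : Nat, t < t' → t' < 9 →
        pvW grid (3*(b/3)+t/3) (3*(b%3)+t%3) ≠ pvW grid (3*(b/3)+t'/3) (3*(b%3)+t'%3) := by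
  rw [show ((PySem.List.pyRange 0 3 1).flatMap (fun i =>
        (PySem.List.pyRange 0 3 1).map (fun j =>
          pvCell grid (((3*(b/3) : Nat) : Int) + i) (((3*(b%3) : Nat) : Int) + j))))
      = (PySem.List.pyRange 0 9 1).map (fun s =>
          pvCell grid (((3*(b/3) : Nat) : Int) + PySem.Int.floordiv s 3)
                      (((3*(b%3) : Nat) : Int) + PySem.Int.mod s 3)) from rfl]
  have hmem : ∀ s : Int, 0 ≤ s → s < 9 →
      pvCell grid (((3*(b/3) : Nat) : Int) + PySem.Int.floordiv s 3)
                  (((3*(b%3) : Nat) : Int) + PySem.Int.mod s 3)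
        ∈ ([1,2,3,4,5,6,7,8,9] : List Int) := by
    intro s hs0 hs9
    rw [PySem.Int.floordiv_eq_ediv_of_pos (by norm_num), PySem.Int.mod_eq_emod_of_pos (by norm_num)]
    exact pv_cell_mem grid (by omega) hrows _ _ (by omega) (by omega) (by omega) (by omega)
  rw [pv_unit_iff _ hmem]
  have e1 : ∀ t : Nat, ((3*(b/3) : Nat) : Int) + PySem.Int.floordiv (t : Int) 3
      = ((3*(b/3) + t/3 : Nat) : Int) := by
    intro t
    rw [PySem.Int.floordiv_eq_ediv_of_pos (by norm_num)]
    omega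
  have e2 : ∀ t : Nat, ((3*(b%3) : Nat) : Int) + PySem.Int.mod (t : Int) 3
      = ((3*(b%3) + t%3 : Nat) : Int) := by
    intro t
    rw [PySem.Int.mod_eq_emod_of_pos (by norm_num)]
    omega
  constructor
  · intro h t t' htt ht9
    have hx := h t t' htt ht9
    unfold pvW
    rwa [e1 t, e2 t, e1 t', e2 t'] at hx
  · intro h t t' htt ht9
    rw [e1 t, e2 t, e1 t', e2 t']
    exact h t t' htt ht9

theorem pv_boxesAll_iff (grid : List (List Int)) (hlen : grid.length = 9)
    (hrows : ∀ row ∈ grid, row.Perm [1,2,3,4,5,6,7,8,9]) :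
    ((PySem.List.pyRange 0 9 3).all (fun r =>
      (PySem.List.pyRange 0 9 3).all (fun c =>
        is_valid_unit ((PySem.List.pyRange 0 3 1).flatMap (fun i =>
          (PySem.List.pyRange 0 3 1).map (fun j => pvCell grid (r + i) (c + j)))))) = true)
    ↔ pvBoxesOK grid := by
  have h369 : PySem.List.pyRange 0 9 3 = [0, 3, 6] := by decide
  rw [h369]
  simp only [List.all_eq_true]
  constructor
  · intro h b t t' hb htt ht9
    interval_cases b <;>
      exact (pv_box_unit_iff grid hlen hrows _ (by norm_num)).mp
        (h _ (by decide) _ (by decide)) t t' htt ht9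
  · intro hbx r hr c hc
    have hr' : r = 0 ∨ r = 3 ∨ r = 6 := by simpa using hr
    have hc' : c = 0 ∨ c = 3 ∨ c = 6 := by simpa using hc
    rcases hr' with rfl | rfl | rfl <;> rcases hc' with rfl | rfl | rfl
    · exact (pv_box_unit_iff grid hlen hrows 0 (by norm_num)).mpr (fun t t' htt ht9 => hbx 0 t t' (by norm_num) htt ht9)
    · exact (pv_box_unit_iff grid hlen hrows 1 (by norm_num)).mpr (fun t t' htt ht9 => hbx 1 t t' (by norm_num) htt ht9)
    · exact (pv_box_unit_iff grid hlen hrows 2 (by norm_num)).mpr (fun t t' htt ht9 => hbx 2 t t' (by norm_num) htt ht9)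
    · exact (pv_box_unit_iff grid hlen hrows 3 (by norm_num)).mpr (fun t t' htt ht9 => hbx 3 t t' (by norm_num) htt ht9)
    · exact (pv_box_unit_iff grid hlen hrows 4 (by norm_num)).mpr (fun t t' htt ht9 => hbx 4 t t' (by norm_num) htt ht9)
    · exact (pv_box_unit_iff grid hlen hrows 5 (by norm_num)).mpr (fun t t' htt ht9 => hbx 5 t t' (by norm_num) htt ht9)
    · exact (pv_box_unit_iff grid hlen hrows 6 (by norm_num)).mpr (fun t t' htt ht9 => hbx 6 t t' (by norm_num) htt ht9)
    · exact (pv_box_unit_iff grid hlen hrows 7 (by norm_num)).mpr (fun t t' htt ht9 => hbx 7 t t' (by norm_num) htt ht9)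
    · exact (pv_box_unit_iff grid hlen hrows 8 (by norm_num)).mpr (fun t t' htt ht9 => hbx 8 t t' (by norm_num) htt ht9)

theorem pv_rowsOK_of_perm (grid : List (List Int)) (hlen : grid.length = 9)
    (hrows : ∀ row ∈ grid, row.Perm [1,2,3,4,5,6,7,8,9]) : pvRowsOK grid := by
  intro i t t' hi htt ht9
  have hig : i < grid.length := by omega
  have hrow := hrows grid[i] (List.getElem_mem hig)
  have h9 : (grid[i]).length = 9 := by rw [hrow.length_eq]; rfl
  have hnd : grid[i].Nodup := hrow.nodup_iff.mpr (by decide)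
  rw [pv_row_eq grid i hig h9] at hnd
  exact (pv_nodup_map_range _).mp hnd t t' htt ht9

-- ===== VERDICT (by name: the statement is the Claim_ definition above) =====
theorem sudoku_validator_spec : Claim_equal_sudoku_validator := by
  intro grid _ hpre
  unfold Spec_sudoku_validator
  by_cases hrows : ∀ row ∈ grid, row.Perm [1,2,3,4,5,6,7,8,9]
  · have hlen : grid.length = 9 := by
      rcases hpre with h | ⟨row, hr, hnp⟩
      · exact h
      · exact absurd (hrows row hr) hnp
    have hrowlen : ∀ row ∈ grid, row.length = 9 := fun row hr => by
      have := (hrows row hr).length_eq; simpa using this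
    have hBcond : (PySem.List.len grid != 9 || grid.any (fun row => PySem.List.len row != 9)) = false := by
      simp only [Bool.or_eq_false_iff, bne_eq_false_iff_eq, List.any_eq_false, PySem.List.len_eq]
      refine ⟨by exact_mod_cast hlen, fun row hr => ?_⟩
      simp only [bne_iff_ne, ne_eq, not_not]
      exact_mod_cast hrowlen row hr
    have hB : sudoku_validator_alt grid = pvPassB grid pvAllCells pvEmptySets pvEmptySets pvEmptySets := by
      unfold sudoku_validator_alt
      rw [hBcond]
      simp
    rw [hB]
    have hA1 : grid.all (fun row => is_valid_unit row) = true := by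
      rw [List.all_eq_true]; exact fun row hr => (pv_isValidUnit_iff row).mpr (hrows row hr)
    unfold sudoku_validator
    rw [Bool.eq_iff_iff]
    simp only [Bool.and_eq_true, hA1, true_and]
    rw [pv_pass_main, pv_colsAll_iff grid hlen hrows, pv_boxesAll_iff grid hlen hrows, pv_NC_iff]
    have hrange : ∀ i j : Nat, i < 9 → j < 9 → 1 ≤ pvW grid i j ∧ pvW grid i j ≤ 9 := by
      intro i j hi hj
      exact (pv_mem_nine_iff _).mp
        (pv_cell_mem grid (by omega) hrows i j (by positivity) (by exact_mod_cast hi)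
          (by positivity) (by exact_mod_cast hj))
    have hrOK := pv_rowsOK_of_perm grid hlen hrows
    constructor
    · rintro ⟨hc, hb⟩; exact ⟨hrange, hrOK, hc, hb⟩
    · rintro ⟨-, -, hc, hb⟩; exact ⟨hc, hb⟩
  · have hA : sudoku_validator grid = false := by
      unfold sudoku_validator
      rw [Bool.eq_false_iff]
      intro hA
      simp only [Bool.and_eq_true, List.all_eq_true] at hA
      exact hrows (fun row hr => (pv_isValidUnit_iff row).mp (hA.1.1 row hr))
    rw [hA]
    by_cases hshape : grid.length = 9 ∧ ∀ row ∈ grid, row.length = 9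
    · obtain ⟨hlen, hrowlen⟩ := hshape
      have hBcond : (PySem.List.len grid != 9 || grid.any (fun row => PySem.List.len row != 9)) = false := by
        simp only [Bool.or_eq_false_iff, bne_eq_false_iff_eq, List.any_eq_false, PySem.List.len_eq]
        refine ⟨by exact_mod_cast hlen, fun row hr => ?_⟩
        simp only [bne_iff_ne, ne_eq, not_not]
        exact_mod_cast hrowlen row hr
      have hB : sudoku_validator_alt grid = pvPassB grid pvAllCells pvEmptySets pvEmptySets pvEmptySets := by
        unfold sudoku_validator_alt
        rw [hBcond]
        simp
      rw [hB]
      symm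
      rw [Bool.eq_false_iff]
      intro hp
      obtain ⟨hrange, hnc⟩ := (pv_pass_main grid).mp hp
      obtain ⟨hrOK, -, -⟩ := (pv_NC_iff grid).mp hnc
      apply hrows
      intro row hr
      obtain ⟨i, hig, rfl⟩ := List.mem_iff_getElem.mp hr
      have h9 : (grid[i]).length = 9 := hrowlen _ (List.getElem_mem hig)
      rw [pv_row_eq grid i hig h9]
      refine (pv_unit_perm_iff _ (by simp) ?_).mpr ?_
      · intro x hx
        simp only [List.mem_map, List.mem_range] at hx
        obtain ⟨j, hj, rfl⟩ := hx
        exact (pv_mem_nine_iff _).mpr (hrange i j (by omega) hj)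
      · rw [pv_nodup_map_range]
        intro t t' htt ht9
        exact hrOK i t t' (by omega) htt ht9
    · have hBcond : (PySem.List.len grid != 9 || grid.any (fun row => PySem.List.len row != 9)) = true := by
        simp only [Bool.or_eq_true, List.any_eq_true, PySem.List.len_eq, bne_iff_ne, ne_eq]
        by_cases hl : grid.length = 9
        · right
          have : ¬ ∀ row ∈ grid, row.length = 9 := fun h => hshape ⟨hl, h⟩
          push Not at this
          obtain ⟨row, hr, hne⟩ := this
          exact ⟨row, hr, fun h => hne (by exact_mod_cast h)⟩
        · left
          exact fun h => hl (by exact_mod_cast h)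
      symm
      unfold sudoku_validator_alt
      rw [hBcond]
      simp
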